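-- pv_equiv track=rewrite | github.com/Lyonsaldanha/Adventofcode2025 | day5/day5part2.py | cleaner
-- ===== SOURCE A (Python) =====
-- def cleaner(inputs):
--     Found = False
--     ranges,availble = [], []
--     for i in inputs:
--         if i and not Found:
--             split = list(map(int,i.split("-")))
--             ranges.append(split)
--         elif i and Found:
--             availble.append(i)
--         else:
--             Found = True
--     return ranges, availble
-- ===== SOURCE B (Python) =====
-- def cleaner(inputs):
--     k = next((j for j, line in enumerate(inputs) if not line), len(inputs))
--     ranges = [[int(x) for x in line.split("-")] for line in inputs[:k]]
--     availble = [line for line in inputs[k + 1:] if line]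
--     return ranges, availble
-- ===== Notes on version B (the rewrite author's own statement) =====
-- stated objective: simpler
-- what changed: Replaces A's single stateful Found-flag loop with a locate-then-slice decomposition: find the index of the first falsy line, parse the lines before it with a comprehension, and filter the truthy lines after it.
import Mathlib
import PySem

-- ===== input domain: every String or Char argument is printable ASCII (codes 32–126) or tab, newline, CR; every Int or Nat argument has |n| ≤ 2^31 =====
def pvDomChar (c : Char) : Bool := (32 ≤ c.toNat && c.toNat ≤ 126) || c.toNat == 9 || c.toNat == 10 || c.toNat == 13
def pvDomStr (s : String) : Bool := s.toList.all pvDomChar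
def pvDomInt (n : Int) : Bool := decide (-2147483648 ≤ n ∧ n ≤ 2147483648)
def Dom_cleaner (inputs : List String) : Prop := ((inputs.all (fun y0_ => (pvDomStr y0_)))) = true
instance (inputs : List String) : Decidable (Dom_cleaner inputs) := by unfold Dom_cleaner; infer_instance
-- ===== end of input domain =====

-- B replaces A's single stateful Found-flag loop with a locate-then-slice decomposition
-- (find the first falsy line, map over the lines before it, filter the ones after it); objective: simpler.

-- list(map(int, i.split("-"))) — exact where every part parses (Pre_ guarantees it; int() raises otherwise)
def pvParse (i : String) : List Int :=
  ((PySem.Str.split? i "-").getD []).map (fun p => (PySem.Int.ofStr? p).getD 0)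

-- ===== PORT A =====
-- A's loop body (the three branches of the for-loop, in order), named for the lemmas below
def pvStep (acc : Bool × List (List Int) × List String) (i : String) :
    Bool × List (List Int) × List String :=
  let (found, ranges, availble) := acc
  if i != "" && !found then (found, ranges ++ [pvParse i], availble)
  else if i != "" && found then (found, ranges, availble ++ [i])
  else (true, ranges, availble)

def cleaner (inputs : List String) : List (List Int) × List String :=
  let st := inputs.foldl pvStep (false, [], [])
  (st.2.1, st.2.2)

-- ===== PORT B =====
def cleaner_alt (inputs : List String) : List (List Int) × List String :=
  let k := inputs.findIdx (fun i => i == "")   -- next((j for j,line in … if not line), len(inputs))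
  let ranges := (inputs.take k).map pvParse
  let availble := (inputs.drop (k + 1)).filter (fun i => i != "")
  (ranges, availble)

-- ===== PRECONDITION & SPEC =====
-- Pre_ excludes exactly the inputs where A raises ValueError: a line before the first empty
-- line whose '-'-separated parts do not all parse as ints.
def Pre_cleaner (inputs : List String) : Prop :=
  ((inputs.takeWhile (fun i => i != "")).all
    (fun i => ((PySem.Str.split? i "-").getD []).all (fun p => (PySem.Int.ofStr? p).isSome))) = true
instance (inputs : List String) : Decidable (Pre_cleaner inputs) := by unfold Pre_cleaner; infer_instance
def pvWitness_cleaner : List String := ["1-3", "5-7", "", "8", "", "10"]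

def Spec_cleaner (inputs : List String) (out : List (List Int) × List String) : Prop := out = cleaner_alt inputs
instance (inputs : List String) (out : List (List Int) × List String) : Decidable (Spec_cleaner inputs out) := by unfold Spec_cleaner; infer_instance

-- ===== CLAIM (what is proved, stated in full; the proofs are below) =====
def Claim_equal_cleaner : Prop := ∀ (inputs : List String), Dom_cleaner inputs → Pre_cleaner inputs → Spec_cleaner inputs (cleaner inputs)

-- ===== LEMMAS AND PROOFS =====

lemma pvFold_true (l : List String) (rs : List (List Int)) (av : List String) :
    l.foldl pvStep (true, rs, av) = (true, rs, av ++ l.filter (fun i => i != "")) := by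
  induction l generalizing av with
  | nil => simp
  | cons i l ih =>
    by_cases h : i = ""
    · subst h; simpa [pvStep] using ih av
    · simp only [List.foldl_cons, pvStep, List.filter_cons]
      have hb : (i != "") = true := by simpa using h
      simp [hb, ih]

lemma pvFold_false (l : List String) (rs : List (List Int)) (av : List String) :
    (l.foldl pvStep (false, rs, av)).2 =
      (rs ++ (l.take (l.findIdx (fun i => i == ""))).map pvParse,
       av ++ (l.drop (l.findIdx (fun i => i == "") + 1)).filter (fun i => i != "")) := by
  induction l generalizing rs av with
  | nil => simp
  | cons i l ih =>
    by_cases h : i = ""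
    · subst h
      simp only [List.foldl_cons, pvStep, List.findIdx_cons]
      simp [pvFold_true]
    · have hb : (i != "") = true := by simpa using h
      have hb' : (i == "") = false := by simpa using h
      simp only [List.foldl_cons, pvStep, List.findIdx_cons, hb, hb']
      simp only [Bool.not_false, Bool.and_true, cond_false, if_pos]
      rw [ih]
      simp

-- ===== VERDICT (by name: the statement is the Claim_ definition above) =====
theorem cleaner_spec : Claim_equal_cleaner := by
  intro inputs _ _
  show cleaner inputs = cleaner_alt inputs
  have h := pvFold_false inputs [] []
  simp only [List.nil_append] at h
  simp [cleaner, cleaner_alt, h]
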